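-- pv_equiv track=rewrite | github.com/MarcelBarrios/Leetcode-Qs | #22 The Vending Machine Change-Maker.py | make_change_memoization
-- ===== SOURCE A (Python) =====
-- def make_change_memoization(coins, amount):
--     """
--     Calculates the minimum number of coins required to make a specific amount
--     using a top-down recursive approach with memoization.
--
--     The core idea is to create a recursive function that solves for a given amount. We'll use a "memo"
--     (a cache, like an array or dictionary) to store the results of amounts we've already calculated,
--     so we never have to solve the same subproblem twice.
--
--     :param coins: A list of available coin denominations.
--     :param amount: The target amount of change.
--     :return: The minimum number of coins, or -1 if impossible.
--     """
--     # Create a cache (memo) to store the results of subproblems.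
--     # Initialize with -1 to indicate that the subproblem has not been solved yet.
--     memo = [-1] * (amount + 1)
--
--     def find_min_coins(target):
--         # --- Base Cases ---
--         # If the target is 0, we need 0 coins.
--         if target == 0:
--             return 0
--         # If the target is negative, this is an invalid path.
--         if target < 0:
--             return float('inf')
--
--         # --- Check the Cache ---
--         # If we have already computed the answer for this target, return it.
--         if memo[target] != -1:
--             return memo[target]
--
--         # --- Recursive Exploration ---
--         # Initialize the minimum coins for this target to infinity.
--         min_coins_for_target = float('inf')
--
--         # Try using each coin to reach the target.
--         for coin in coins:
--             # Recursively solve for the remaining amount.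
--             result = find_min_coins(target - coin)
--
--             # If the recursive call found a valid solution (not infinity)...
--             if result != float('inf'):
--                 # ...update our minimum for the current target.
--                 # The total is 1 (for the current coin) + the result for the rest.
--                 min_coins_for_target = min(min_coins_for_target, 1 + result)
--
--         # --- Store and Return ---
--         # Store the computed minimum in our cache.
--         memo[target] = min_coins_for_target
--         return min_coins_for_target
--
--     # Kick off the recursion for the initial amount.
--     final_result = find_min_coins(amount)
--
--     # If the result is still infinity, it means the amount was impossible to make.
--     return final_result if final_result != float('inf') else -1
-- ===== SOURCE B (Python) =====
-- def make_change_memoization(coins, amount):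
--     """Bottom-up tabulation: dp[i] = min coins to make i, swept once from 1 to amount."""
--     if amount < 0:
--         return -1
--     INF = amount + 1
--     dp = [0] + [INF] * amount
--     for i in range(1, amount + 1):
--         dp[i] = min((dp[i - c] + 1 for c in coins if 0 < c <= i), default=INF)
--     return dp[amount] if dp[amount] <= amount else -1
-- ===== Notes on version B (the rewrite author's own statement) =====
-- stated objective: alternative
-- what changed: Replaced the top-down recursion with a memo cache by a bottom-up tabulation: one forward sweep filling dp[0..amount] with an integer sentinel amount+1 instead of float('inf').
import Mathlib
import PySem

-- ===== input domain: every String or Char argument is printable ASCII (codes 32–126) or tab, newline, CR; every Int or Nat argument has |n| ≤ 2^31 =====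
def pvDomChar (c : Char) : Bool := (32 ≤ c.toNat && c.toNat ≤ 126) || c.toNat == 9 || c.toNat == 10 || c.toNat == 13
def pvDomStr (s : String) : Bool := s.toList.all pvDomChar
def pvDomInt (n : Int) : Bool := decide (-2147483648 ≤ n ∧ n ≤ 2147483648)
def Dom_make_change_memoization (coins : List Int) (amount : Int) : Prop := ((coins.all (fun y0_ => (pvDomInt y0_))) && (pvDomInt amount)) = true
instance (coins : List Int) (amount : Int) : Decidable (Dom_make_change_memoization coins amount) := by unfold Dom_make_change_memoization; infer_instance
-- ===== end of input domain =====

-- B replaces A's top-down memoized recursion by a bottom-up tabulation sweep (alternative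
-- decomposition, same recurrence); equivalence is about the return value.

-- ===== PORT A =====
-- Python's float('inf') is modelled as `none : Option Int` (A only ever compares it for
-- (in)equality and takes min with it); a memo cell `none` models the -1 "unsolved" sentinel,
-- `some r` a stored value r (which can itself be the inf `none`).
def combA (acc : Option Int) (r : Option Int) : Option Int :=
  match r with
  | none => acc                                  -- result == inf: skip
  | some v =>
    match acc with
    | none => some (1 + v)                       -- min(inf, 1 + result)
    | some a => some (min a (1 + v))             -- min(min_coins, 1 + result)

-- find_min_coins; `fuel` is only a totality guard (never exhausted on Pre_).
def findMin (coins : List Int) : Nat → Int → Array (Option (Option Int)) → Option Int × Array (Option (Option Int))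
  | 0, _, memo => (none, memo)
  | fuel+1, target, memo =>
    if target = 0 then (some 0, memo)
    else if target < 0 then (none, memo)
    else
      match memo.getD target.toNat none with
      | some r => (r, memo)                      -- memo[target] != -1
      | none =>
        let st := coins.foldl (fun st coin =>
          let q := findMin coins fuel (target - coin) st.2
          (combA st.1 q.1, q.2)) ((none : Option Int), memo)
        (st.1, st.2.setIfInBounds target.toNat (some st.1))

def make_change_memoization (coins : List Int) (amount : Int) : Int :=
  let memo : Array (Option (Option Int)) := Array.replicate (amount + 1).toNat none
  match (findMin coins (amount.toNat + 1) amount memo).1 with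
  | some n => n
  | none => -1

-- ===== PORT B =====
-- min(generator, default=INF) is ported as an Option-valued fold (`none` = empty generator).
def make_change_memoization_alt (coins : List Int) (amount : Int) : Int :=
  if amount < 0 then -1
  else
    let INF := amount + 1
    let dp0 : Array Int := #[0] ++ Array.replicate amount.toNat INF
    let dp := (PySem.List.pyRange 1 (amount+1) 1).foldl (fun dp i =>
      let v := coins.foldl (fun acc c =>
        if 0 < c ∧ c ≤ i then
          let w := dp.getD (i - c).toNat 0 + 1
          some (match acc with | none => w | some m => min m w)
        else acc) (none : Option Int)
      dp.setIfInBounds i.toNat (v.getD INF)) dp0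
    if dp.getD amount.toNat 0 ≤ amount then dp.getD amount.toNat 0 else -1

-- ===== PRECONDITION & SPEC =====
-- Pre_ excludes exactly the inputs on which A raises: a positive amount together with a coin
-- ≤ 0 makes A's recursion diverge (RecursionError for coin 0, IndexError past the memo for a
-- negative coin); A returns normally on every other input.
def Pre_make_change_memoization (coins : List Int) (amount : Int) : Prop :=
  amount ≤ 0 ∨ ∀ c ∈ coins, 0 < c
instance (coins : List Int) (amount : Int) : Decidable (Pre_make_change_memoization coins amount) := by
  unfold Pre_make_change_memoization; infer_instance

def pvWitness_make_change_memoization : List Int × Int := ([1, 2, 5], 11)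

def Spec_make_change_memoization (coins : List Int) (amount : Int) (out : Int) : Prop := out = make_change_memoization_alt coins amount
instance (coins : List Int) (amount : Int) (out : Int) : Decidable (Spec_make_change_memoization coins amount out) := by unfold Spec_make_change_memoization; infer_instance

-- ===== CLAIM (what is proved, stated in full; the proofs are below) =====
def Claim_equal_make_change_memoization : Prop := ∀ (coins : List Int) (amount : Int), Dom_make_change_memoization coins amount → Pre_make_change_memoization coins amount → Spec_make_change_memoization coins amount (make_change_memoization coins amount)

-- ===== LEMMAS AND PROOFS =====

-- The recurrence both programs implement, folded over coins in A's loop order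
-- (none = unreachable / Python's inf).
def mc (coins : List Int) (t : Nat) : Option Int :=
  if _h0 : t = 0 then some 0
  else coins.foldl (fun acc c => if _h : 0 < c ∧ c.toNat ≤ t then combA acc (mc coins (t - c.toNat)) else acc) none
termination_by t
decreasing_by omega

def mcI (coins : List Int) (t : Int) : Option Int :=
  if 0 ≤ t then mc coins t.toNat else none

-- memo coherence: every stored cell holds the recurrence's value
def Coh (coins : List Int) (memo : Array (Option (Option Int))) : Prop :=
  ∀ (j : Nat) (r : Option Int), memo[j]? = some (some r) → r = mc coins j

-- proof-side names for B's two fold functions (definitionally equal to the port's lambdas)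
def gB (dp : Array Int) (i : Int) (acc : Option Int) (c : Int) : Option Int :=
  if 0 < c ∧ c ≤ i then
    some (match acc with
          | none => dp.getD ((i - c).toNat) 0 + 1
          | some m => min m (dp.getD ((i - c).toNat) 0 + 1))
  else acc

def Bstep (coins : List Int) (amount : Int) (dp : Array Int) (i : Int) : Array Int :=
  dp.setIfInBounds i.toNat ((coins.foldl (gB dp i) none).getD (amount+1))

-- relation between A's fold accumulator (none = inf) and B's (none = empty generator;
-- values ≥ INF+1 are sentinel junk propagated from unreachable cells)
def Rin (INF i : Int) : Option Int → Option Int → Prop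
  | none, none => True
  | none, some u => INF + 1 ≤ u
  | some v, some u => u = v ∧ v ≤ i
  | some _, none => False

-- dp agrees with the recurrence on all cells ≤ k (unreachable cells hold ≥ INF)
def Good (coins : List Int) (amount : Int) (dp : Array Int) (k : Nat) : Prop :=
  dp.size = amount.toNat + 1 ∧
  ∀ j : Nat, j ≤ k →
    match mc coins j with
    | some v => dp.getD j 0 = v
    | none => amount + 1 ≤ dp.getD j 0

lemma mc_bounds (coins : List Int) (hpos : ∀ c ∈ coins, 0 < c) :
    ∀ (t : Nat) (v : Int), mc coins t = some v → 0 ≤ v ∧ v ≤ (t : Int) := by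
  intro t
  induction t using Nat.strong_induction_on with
  | _ t ih =>
    intro v hv
    by_cases h0 : t = 0
    · subst h0
      rw [mc] at hv
      simp at hv
      omega
    · rw [mc] at hv
      simp only [dif_neg h0] at hv
      have aux : ∀ (cs : List Int), (∀ c ∈ cs, 0 < c) →
          ∀ (acc : Option Int), (∀ a, acc = some a → 0 ≤ a ∧ a ≤ (t : Int)) →
          ∀ w, cs.foldl (fun acc c => if _h : 0 < c ∧ c.toNat ≤ t then combA acc (mc coins (t - c.toNat)) else acc) acc = some w →
          0 ≤ w ∧ w ≤ (t : Int) := by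
        intro cs
        induction cs with
        | nil =>
          intro _ acc hacc w hw
          simp only [List.foldl_nil] at hw
          exact hacc w hw
        | cons c cs ihc =>
          intro hcs acc hacc w hw
          simp only [List.foldl_cons] at hw
          apply ihc (fun x hx => hcs x (List.mem_cons_of_mem _ hx)) _ ?_ w hw
          intro a ha
          by_cases hcond : 0 < c ∧ c.toNat ≤ t
          · rw [dif_pos hcond] at ha
            have hct : ((t - c.toNat : Nat) : Int) ≤ (t : Int) - 1 := by omega
            rcases hmc : mc coins (t - c.toNat) with _ | u
            · rw [hmc] at ha
              simp only [combA] at ha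
              exact hacc a ha
            · have hu := ih (t - c.toNat) (by omega) u hmc
              rw [hmc] at ha
              rcases acc with _ | b
              · simp only [combA, Option.some.injEq] at ha
                omega
              · simp only [combA, Option.some.injEq] at ha
                have hb := hacc b rfl
                rw [min_def] at ha
                split_ifs at ha <;> omega
          · rw [dif_neg hcond] at ha
            exact hacc a ha
      exact aux coins hpos none (by simp) v hv


lemma findMin_spec (coins : List Int) (hpos : ∀ c ∈ coins, 0 < c) :
    ∀ (fuel : Nat) (target : Int) (memo : Array (Option (Option Int))),
      target.toNat < fuel → Coh coins memo →
      (findMin coins fuel target memo).1 = mcI coins target ∧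
      Coh coins (findMin coins fuel target memo).2 := by
  intro fuel
  induction fuel with
  | zero => intro target memo hf; omega
  | succ fuel ih =>
    intro target memo hf hcoh
    by_cases ht0 : target = 0
    · subst ht0
      rw [mcI, mc]
      simp [findMin]
      exact hcoh
    · by_cases htn : target < 0
      · rw [mcI]
        simp only [findMin, if_neg ht0, if_pos htn]
        constructor
        · rw [if_neg (by omega)]
        · exact hcoh
      · have htpos : 0 < target := by omega
        have htnat : target.toNat ≠ 0 := by omega
        rw [mcI, if_pos (by omega)]
        simp only [findMin, if_neg ht0, if_neg htn]
        cases hget : memo.getD target.toNat none with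
        | some r =>
          have hmem : memo[target.toNat]? = some (some r) := by
            rw [Array.getD_eq_getD_getElem?] at hget
            cases hmm : memo[target.toNat]? with
            | none => rw [hmm] at hget; simp at hget
            | some cell => rw [hmm] at hget; simp at hget; rw [hget]
          exact ⟨(hcoh _ _ hmem).symm ▸ rfl, hcoh⟩
        | none =>
          have key : ∀ (cs : List Int), (∀ c ∈ cs, 0 < c) →
              ∀ (acc : Option Int) (m : Array (Option (Option Int))), Coh coins m →
              (cs.foldl (fun st coin =>
                  (combA st.1 (findMin coins fuel (target - coin) st.2).1, (findMin coins fuel (target - coin) st.2).2)) (acc, m)).1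
                = cs.foldl (fun acc c => if _h : 0 < c ∧ c.toNat ≤ target.toNat then combA acc (mc coins (target.toNat - c.toNat)) else acc) acc
              ∧ Coh coins (cs.foldl (fun st coin =>
                  (combA st.1 (findMin coins fuel (target - coin) st.2).1, (findMin coins fuel (target - coin) st.2).2)) (acc, m)).2 := by
            intro cs
            induction cs with
            | nil => intro _ acc m hm; exact ⟨rfl, hm⟩
            | cons c cs ihc =>
              intro hcs acc m hm
              have hc : 0 < c := hcs c (List.mem_cons_self)
              have hfc : (target - c).toNat < fuel := by omega
              obtain ⟨hq1, hq2⟩ := ih (target - c) m hfc hm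
              simp only [List.foldl_cons]
              by_cases hcond : c.toNat ≤ target.toNat
              · have h0tc : 0 ≤ target - c := by omega
                have : mcI coins (target - c) = mc coins (target.toNat - c.toNat) := by
                  rw [mcI, if_pos h0tc]
                  congr 1
                  omega
                rw [this] at hq1
                have := ihc (fun x hx => hcs x (List.mem_cons_of_mem _ hx))
                  (combA acc (mc coins (target.toNat - c.toNat))) (findMin coins fuel (target - c) m).2 hq2
                rw [dif_pos ⟨hc, hcond⟩]
                simpa [hq1] using this
              · have : mcI coins (target - c) = none := by
                  rw [mcI, if_neg (by omega)]
                rw [this] at hq1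
                have := ihc (fun x hx => hcs x (List.mem_cons_of_mem _ hx))
                  acc (findMin coins fuel (target - c) m).2 hq2
                rw [dif_neg (by omega : ¬ (0 < c ∧ c.toNat ≤ target.toNat))]
                simpa [hq1, combA] using this
          obtain ⟨k1, k2⟩ := key coins hpos none memo hcoh
          have hmceq : mc coins target.toNat
              = coins.foldl (fun acc c => if _h : 0 < c ∧ c.toNat ≤ target.toNat then combA acc (mc coins (target.toNat - c.toNat)) else acc) none := by
            rw [mc, dif_neg htnat]
          constructor
          · rw [hmceq]; exact k1
          · intro j r hj
            rw [Array.getElem?_setIfInBounds] at hj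
            split_ifs at hj with hij hb
            · simp only [Option.some.injEq] at hj
              rw [← hj, ← hij, k1, hmceq]
            all_goals exact k2 j r hj

lemma inner_rel (coins : List Int) (hpos : ∀ c ∈ coins, 0 < c) (amount : Int)
    (dp : Array Int) (k : Nat) (hk1 : (k : Int) + 1 ≤ amount)
    (hgood : ∀ j : Nat, j ≤ k →
      match mc coins j with
      | some v => dp.getD j 0 = v
      | none => amount + 1 ≤ dp.getD j 0) :
    ∀ (cs : List Int) (acc accB : Option Int), Rin (amount+1) ((k:Int)+1) acc accB →
    Rin (amount+1) ((k:Int)+1)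
      (cs.foldl (fun acc c => if _h : 0 < c ∧ c.toNat ≤ (k+1) then combA acc (mc coins (k+1 - c.toNat)) else acc) acc)
      (cs.foldl (gB dp ((k:Int)+1)) accB) := by
  intro cs
  induction cs with
  | nil => intro acc accB h; exact h
  | cons c cs ihc =>
    intro acc accB h
    simp only [List.foldl_cons]
    apply ihc
    by_cases hcond : 0 < c ∧ c ≤ (k:Int)+1
    · have hcondN : 0 < c ∧ c.toNat ≤ k+1 := by omega
      unfold gB
      rw [dif_pos hcondN, if_pos hcond]
      have hj : (((k:Int)+1 - c).toNat) = k + 1 - c.toNat := by omega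
      have hjk : k + 1 - c.toNat ≤ k := by omega
      rw [hj]
      have hjcast : ((k + 1 - c.toNat : Nat) : Int) ≤ (k : Int) := by omega
      have hgj := hgood (k + 1 - c.toNat) hjk
      cases hm : mc coins (k + 1 - c.toNat) with
      | some w =>
        simp only [hm] at hgj
        have hw := mc_bounds coins hpos (k + 1 - c.toNat) w hm
        rcases acc with _ | v <;> rcases accB with _ | u
        · simp only [Rin] at h ⊢
          simp only [combA, hgj]
          constructor <;> omega
        · simp only [Rin] at h
          simp only [combA, hgj]
          rw [min_eq_right (by omega)]
          constructor <;> omega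
        · exact absurd h (by simp [Rin])
        · simp only [Rin] at h
          simp only [combA, hgj, h.1]
          rw [show (1 : Int) + w = w + 1 by ring]
          exact ⟨rfl, le_trans (min_le_left _ _) h.2⟩
      | none =>
        simp only [hm] at hgj
        rcases acc with _ | v <;> rcases accB with _ | u
        · simp only [Rin] at h ⊢
          simp only [combA]
          omega
        · simp only [Rin] at h
          simp only [combA, Rin]
          rw [le_min_iff]
          omega
        · exact absurd h (by simp [Rin])
        · simp only [Rin] at h
          simp only [combA, Rin]
          rw [h.1, min_eq_left (by omega : v ≤ dp.getD (k + 1 - c.toNat) 0 + 1)]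
          exact ⟨rfl, h.2⟩
    · unfold gB
      rw [dif_neg (by omega), if_neg hcond]
      exact h


lemma alt_unfold (coins : List Int) (amount : Int) (h : ¬ amount < 0) :
    make_change_memoization_alt coins amount =
      (if ((PySem.List.pyRange 1 (amount+1) 1).foldl (Bstep coins amount)
            (#[0] ++ Array.replicate amount.toNat (amount+1))).getD amount.toNat 0 ≤ amount
       then ((PySem.List.pyRange 1 (amount+1) 1).foldl (Bstep coins amount)
            (#[0] ++ Array.replicate amount.toNat (amount+1))).getD amount.toNat 0
       else -1) := by
  rw [make_change_memoization_alt, if_neg h]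
  rfl

lemma bloop_good (coins : List Int) (amount : Int) (hpos : ∀ c ∈ coins, 0 < c) :
    ∀ k : Nat, k ≤ amount.toNat →
      Good coins amount
        ((PySem.List.pyRange 1 ((k : Int)+1) 1).foldl (Bstep coins amount)
          (#[0] ++ Array.replicate amount.toNat (amount+1))) k := by
  intro k
  induction k with
  | zero =>
    intro _
    rw [show (((0:Nat) : Int)+1) = (1:Int) by norm_num]
    rw [show PySem.List.pyRange 1 1 1 = [] by decide, List.foldl_nil]
    constructor
    · simp [Array.size_append, Array.size_replicate]; omega
    · intro j hj
      interval_cases j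
      rw [mc]
      simp only [reduceDIte]
      rw [Array.getD_eq_getD_getElem?, Array.getElem?_append_left (by simp)]
      rfl
  | succ k ihk =>
    intro hk
    have hcast : (((k+1 : Nat)) : Int) + 1 = ((k : Int) + 1) + 1 := by push_cast; ring
    rw [hcast, PySem.List.pyRange_one_succ_right (by omega : (1:Int) ≤ (k:Int)+1), List.foldl_append,
      List.foldl_cons, List.foldl_nil]
    obtain ⟨hsz, hvals⟩ := ihk (by omega)
    set dpk := (PySem.List.pyRange 1 ((k : Int)+1) 1).foldl (Bstep coins amount)
      (#[0] ++ Array.replicate amount.toNat (amount+1)) with hdpk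
    have hrel := inner_rel coins hpos amount dpk k (by omega) hvals coins none none trivial
    have hmc : mc coins (k+1)
        = coins.foldl (fun acc c => if _h : 0 < c ∧ c.toNat ≤ (k+1) then combA acc (mc coins (k+1 - c.toNat)) else acc) none := by
      rw [mc, dif_neg (Nat.succ_ne_zero k)]
    rw [Bstep, show ((k:Int)+1).toNat = k+1 by omega]
    constructor
    · rw [Array.size_setIfInBounds]; exact hsz
    · intro j hj
      rw [Array.getD_eq_getD_getElem?, Array.getElem?_setIfInBounds]
      by_cases hjk : k+1 = j
      · rw [if_pos hjk, if_pos (by omega : k+1 < dpk.size), ← hjk]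
        rw [← hmc] at hrel
        cases hR : mc coins (k+1) with
        | some v =>
          rw [hR] at hrel
          cases hB : (coins.foldl (gB dpk ((k:Int)+1)) none) with
          | none => rw [hB] at hrel; exact absurd hrel (by simp [Rin])
          | some u =>
            rw [hB] at hrel
            simp only [Rin] at hrel
            simp only [Option.getD_some]
            exact hrel.1
        | none =>
          rw [hR] at hrel
          cases hB : (coins.foldl (gB dpk ((k:Int)+1)) none) with
          | none => simp
          | some u =>
            rw [hB] at hrel
            simp only [Rin] at hrel
            simp only [Option.getD_some]
            omega
      · rw [if_neg hjk]
        have := hvals j (by omega)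
        rw [Array.getD_eq_getD_getElem?] at this
        exact this

-- ===== VERDICT (by name: the statement is the Claim_ definition above) =====
theorem make_change_memoization_spec : Claim_equal_make_change_memoization := by
  intro coins amount _hdom hpre
  unfold Spec_make_change_memoization
  by_cases hneg : amount < 0
  · rw [make_change_memoization_alt, if_pos hneg]
    simp only [make_change_memoization]
    rw [show amount.toNat + 1 = 1 from by omega]
    simp only [findMin, if_neg (by omega : ¬ amount = 0), if_pos hneg]
  · by_cases hz : amount = 0
    · subst hz
      have hL : make_change_memoization coins 0 = 0 := by
        simp [make_change_memoization, findMin]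
      have hR : make_change_memoization_alt coins 0 = 0 := by
        rw [make_change_memoization_alt, if_neg hneg]
        rw [show (0:Int)+1 = 1 by norm_num, show PySem.List.pyRange 1 1 1 = [] by decide]
        simp [List.foldl_nil, Array.getD_eq_getD_getElem?]
      rw [hL, hR]
    · have hpos : ∀ c ∈ coins, 0 < c := by
        rcases hpre with h | h
        · omega
        · exact h
      have hcoh0 : Coh coins (Array.replicate (amount + 1).toNat none) := by
        intro j r hj
        rw [Array.getElem?_replicate] at hj
        split_ifs at hj
        all_goals simp at hj
      obtain ⟨hA, -⟩ := findMin_spec coins hpos (amount.toNat + 1) amount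
        (Array.replicate (amount + 1).toNat none) (by omega) hcoh0
      simp only [make_change_memoization]
      rw [hA, mcI, if_pos (by omega : (0:Int) ≤ amount)]
      rw [alt_unfold coins amount hneg]
      obtain ⟨-, hvals⟩ := bloop_good coins amount hpos amount.toNat (le_refl _)
      have hcast2 : ((amount.toNat : Int) + 1) = amount + 1 := by omega
      rw [hcast2] at hvals
      have hval := hvals amount.toNat (le_refl _)
      cases hR : mc coins amount.toNat with
      | some v =>
        have hb := mc_bounds coins hpos amount.toNat v hR
        simp only [hR] at hval
        rw [hval, if_pos (by omega : v ≤ amount)]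
      | none =>
        simp only [hR] at hval
        rw [if_neg (by omega)]
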